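-- pv_equiv track=rewrite | github.com/jaeheeLee17/Programming_Fundamentals | Object_and_Class/SlidingPuzzle/SlidingPuzzleGame.py | create_goal_board
-- ===== SOURCE A (Python) =====
-- def create_goal_board(size):
--     numbers = [n for n in range(size ** 2)]
--     board, empty = [], None
--     for r in range(size):
--         k = r * size
--         row = numbers[k : k + size]
--         if 0 in row:
--             c = row.index(0)
--             empty = (r, c)
--         board.append(numbers[k : k + size])
--     return board
-- ===== SOURCE B (Python) =====
-- def create_goal_board(size):
--     return [[r * size + c for c in range(size)] for r in range(size)]
-- ===== Notes on version B (the rewrite author's own statement) =====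
-- stated objective: idiomatic
-- what changed: Replaces the flat 0..size^2-1 list, per-row slicing and the dead `empty`/index bookkeeping with a nested comprehension that computes each cell directly as r*size + c.
import Mathlib
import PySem

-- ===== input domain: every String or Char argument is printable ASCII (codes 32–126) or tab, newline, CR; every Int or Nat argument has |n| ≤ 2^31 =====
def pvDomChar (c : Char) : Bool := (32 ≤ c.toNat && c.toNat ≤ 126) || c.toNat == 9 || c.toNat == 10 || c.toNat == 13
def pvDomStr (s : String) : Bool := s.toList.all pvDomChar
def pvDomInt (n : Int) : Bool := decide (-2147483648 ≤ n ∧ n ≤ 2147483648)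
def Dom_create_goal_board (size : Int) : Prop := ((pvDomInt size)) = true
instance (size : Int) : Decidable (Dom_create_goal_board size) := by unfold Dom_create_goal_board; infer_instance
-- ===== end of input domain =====

-- B replaces A's flat 0..size²-1 list, per-row slicing and dead `empty` bookkeeping by a
-- nested comprehension computing each cell as r*size + c (idiomatic; same asymptotic cost).

-- ===== PORT A =====
def create_goal_board (size : Int) : List (List Int) :=
  let numbers := PySem.List.pyRange 0 (size ^ 2) 1
  let st := (PySem.List.pyRange 0 size 1).foldl
    (fun (s : List (List Int) × Option (Int × Int)) r =>
      let k := r * size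
      let row := PySem.List.slice numbers (some k) (some (k + size))
      let empty :=
        if (0 : Int) ∈ row then
          -- row.index(0): inside the membership guard Python's .index cannot raise
          some (r, (((PySem.List.index? row 0).getD 0 : Nat) : Int))
        else s.2
      (s.1 ++ [PySem.List.slice numbers (some k) (some (k + size))], empty))
    (([], none))
  st.1

-- ===== PORT B =====
def create_goal_board_alt (size : Int) : List (List Int) :=
  (PySem.List.pyRange 0 size 1).map (fun r =>
    (PySem.List.pyRange 0 size 1).map (fun c => r * size + c))

-- ===== PRECONDITION & SPEC =====
def Spec_create_goal_board (size : Int) (out : List (List Int)) : Prop := out = create_goal_board_alt size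
instance (size : Int) (out : List (List Int)) : Decidable (Spec_create_goal_board size out) := by unfold Spec_create_goal_board; infer_instance

-- ===== CLAIM (what is proved, stated in full; the proofs are below) =====
def Claim_equal_create_goal_board : Prop := ∀ (size : Int), Dom_create_goal_board size → Spec_create_goal_board size (create_goal_board size)

-- ===== LEMMAS AND PROOFS =====

-- A's loop only ever appends to the board component; the `empty` component never feeds back.
theorem pv_fold_board (g : Int → List Int)
    (e : List (List Int) × Option (Int × Int) → Int → Option (Int × Int)) :
    ∀ (l : List Int) (acc : List (List Int)) (em : Option (Int × Int)),
      (l.foldl (fun s r => (s.1 ++ [g r], e s r)) (acc, em)).1 = acc ++ l.map g := by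
  intro l
  induction l with
  | nil => intro acc em; simp
  | cons x xs ih => intro acc em; simp [List.foldl_cons, ih]

-- the slice of the flat table cut out for row rn IS the arithmetic row, on Nat ranges
theorem pv_row_nat (n rn : Nat) (h : rn < n) :
    ((List.range (n * n)).drop (rn * n)).take n = (List.range n).map (fun c => rn * n + c) := by
  have hle : rn * n + n ≤ n * n := by nlinarith
  apply List.ext_getElem
  · simp; omega
  · intro i h1 h2
    simp [List.getElem_take, List.getElem_drop, List.getElem_range] at *

-- the same fact lifted to A's Int-valued slice of pyRange
theorem pv_row_int (size r : Int) (h0 : 0 ≤ r) (h1 : r < size) :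
    PySem.List.slice (PySem.List.pyRange 0 (size ^ 2) 1) (some (r * size)) (some (r * size + size))
      = (PySem.List.pyRange 0 size 1).map (fun c => r * size + c) := by
  have hs : 0 < size := lt_of_le_of_lt h0 h1
  obtain ⟨n, rfl⟩ : ∃ n : Nat, size = (n : Int) := ⟨size.toNat, (Int.toNat_of_nonneg hs.le).symm⟩
  obtain ⟨rn, rfl⟩ : ∃ m : Nat, r = (m : Int) := ⟨r.toNat, (Int.toNat_of_nonneg h0).symm⟩
  have hrn : rn < n := by exact_mod_cast h1
  rw [PySem.List.pyRange_one, PySem.List.pyRange_one]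
  have h2 : ((n : Int) ^ 2 - 0).toNat = n * n := by rw [sq]; omega
  have h3 : ((n : Int) - 0).toNat = n := by omega
  rw [h2, h3]
  rw [show (rn : Int) * n = ((rn * n : Nat) : Int) by push_cast; ring,
      show ((rn * n : Nat) : Int) + n = ((rn * n + n : Nat) : Int) by push_cast; ring]
  rw [PySem.List.slice_natCast]
  have h4 : rn * n + n - rn * n = n := by omega
  rw [← List.map_drop, ← List.map_take, h4, pv_row_nat n rn hrn, List.map_map, List.map_map]
  apply List.map_congr_left
  intro c _
  simp

-- ===== VERDICT (by name: the statement is the Claim_ definition above) =====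
theorem create_goal_board_spec : Claim_equal_create_goal_board := by
  intro size _
  unfold Spec_create_goal_board create_goal_board create_goal_board_alt
  simp only []
  rw [pv_fold_board]
  rw [List.nil_append]
  apply List.map_congr_left
  intro r hr
  rw [PySem.List.mem_pyRange_one] at hr
  exact pv_row_int size r hr.1 hr.2
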